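-- pv_equiv track=rewrite | github.com/Kris465/MemoryBox | old_projects/unseen_repo/RPO/IT/par64/task7.py | find_max_duplicate
-- ===== SOURCE A (Python) =====
-- def find_max_duplicate(arr):
--     from collections import Counter
--
--     count = Counter(arr)
--     duplicates = [num for num, freq in count.items() if freq > 1]
--
--     if duplicates:
--         return max(duplicates)
--     else:
--         return None
-- ===== SOURCE B (Python) =====
-- def find_max_duplicate(arr):
--     seen = set()
--     best = None
--     for x in arr:
--         if x in seen:
--             best = x if best is None else max(best, x)
--         else:
--             seen.add(x)
--     return best
-- ===== Notes on version B (the rewrite author's own statement) =====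
-- stated objective: simpler
-- what changed: Replaces the three passes (build a Counter, filter items with freq>1 into a list, take max of that list) with a single fused pass that keeps a membership set and a running maximum over elements seen before.
import Mathlib
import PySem

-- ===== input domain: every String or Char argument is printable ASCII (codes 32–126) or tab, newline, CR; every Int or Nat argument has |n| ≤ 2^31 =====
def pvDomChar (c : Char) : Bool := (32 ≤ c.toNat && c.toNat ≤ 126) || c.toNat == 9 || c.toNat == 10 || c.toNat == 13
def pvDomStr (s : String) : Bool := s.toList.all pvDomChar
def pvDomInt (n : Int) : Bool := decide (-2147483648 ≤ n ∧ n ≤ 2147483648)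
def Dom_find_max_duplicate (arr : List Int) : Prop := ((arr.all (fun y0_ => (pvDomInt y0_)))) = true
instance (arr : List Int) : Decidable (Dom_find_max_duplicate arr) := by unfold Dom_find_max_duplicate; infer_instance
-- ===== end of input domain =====

-- B replaces A's three passes (Counter, filter freq>1, max) by ONE fused pass keeping a seen-set and a running maximum; same values, no speed claim.

-- ===== PORT A =====
def find_max_duplicate (arr : List Int) : Option Int :=
  let count : PySem.Dict Int Int := PySem.Dict.counter arr
  let duplicates : List Int := (count.items.filter (fun p => 1 < p.2)).map Prod.fst
  if duplicates ≠ [] then PySem.List.max? duplicates (fun x => x) else none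

-- ===== PORT B =====
def find_max_duplicate_alt (arr : List Int) : Option Int :=
  (arr.foldl
    (fun (st : PySem.Set Int × Option Int) x =>
      if PySem.Set.contains st.1 x then
        (st.1, some (match st.2 with | none => x | some b => max b x))
      else
        (PySem.Set.add st.1 x, st.2))
    (PySem.Set.empty, none)).2

-- ===== PRECONDITION & SPEC =====
def Spec_find_max_duplicate (arr : List Int) (out : Option Int) : Prop := out = find_max_duplicate_alt arr
instance (arr : List Int) (out : Option Int) : Decidable (Spec_find_max_duplicate arr out) := by unfold Spec_find_max_duplicate; infer_instance

-- ===== CLAIM (what is proved, stated in full; the proofs are below) =====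
def Claim_equal_find_max_duplicate : Prop := ∀ (arr : List Int), Dom_find_max_duplicate arr → Spec_find_max_duplicate arr (find_max_duplicate arr)

-- ===== LEMMAS AND PROOFS =====

-- occurrences of l that are "already seen" w.r.t. the growing seen-set s (B's duplicate stream)
def dupsFrom (s : List Int) : List Int → List Int
  | [] => []
  | x :: t => if x ∈ s then x :: dupsFrom s t else dupsFrom (s ++ [x]) t

lemma add_of_not_mem (s : PySem.Set Int) (x : Int) (h : x ∉ s) :
    PySem.Set.add s x = s ++ [x] := by
  simp [PySem.Set.add, h]

-- the loop's best-component equals a fold of max over dupsFrom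
lemma foldl_snd_eq (l : List Int) : ∀ (s : List Int) (b : Option Int),
    (l.foldl
      (fun (st : PySem.Set Int × Option Int) x =>
        if PySem.Set.contains st.1 x then
          (st.1, some (match st.2 with | none => x | some b => max b x))
        else
          (PySem.Set.add st.1 x, st.2)) (s, b)).2
    = (dupsFrom s l).foldl
        (fun o x => some (match o with | none => x | some b => max b x)) b := by
  induction l with
  | nil => intro s b; simp [dupsFrom]
  | cons x t ih =>
    intro s b
    by_cases h : x ∈ s
    · have hc : PySem.Set.contains s x = true := by simp [h]
      rw [List.foldl_cons, dupsFrom, if_pos h, List.foldl_cons]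
      simp only [hc, if_true]
      exact ih s _
    · have hc : PySem.Set.contains s x = false := by simp [h]
      rw [List.foldl_cons, dupsFrom, if_neg h]
      simp only [hc, Bool.false_eq_true, if_false]
      rw [add_of_not_mem s x h]
      exact ih (s ++ [x]) b

lemma mem_dupsFrom (l : List Int) : ∀ (s : List Int) (y : Int),
    y ∈ dupsFrom s l ↔ (y ∈ s ∧ y ∈ l) ∨ (y ∉ s ∧ 2 ≤ l.count y) := by
  induction l with
  | nil => intro s y; simp [dupsFrom]
  | cons x t ih =>
    intro s y
    by_cases h : x ∈ s
    · rw [dupsFrom, if_pos h, List.mem_cons, ih]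
      by_cases hyx : y = x
      · subst hyx; simp [h]
      · have hcnt : (x :: t).count y = t.count y := by
          simp [Ne.symm hyx]
        simp only [hcnt, List.mem_cons]
        constructor
        · rintro (rfl | ⟨h1, h2⟩ | ⟨h1, h2⟩)
          · exact absurd rfl hyx
          · exact Or.inl ⟨h1, Or.inr h2⟩
          · exact Or.inr ⟨h1, h2⟩
        · rintro (⟨h1, rfl | h2⟩ | ⟨h1, h2⟩)
          · exact absurd rfl hyx
          · exact Or.inr (Or.inl ⟨h1, h2⟩)
          · exact Or.inr (Or.inr ⟨h1, h2⟩)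
    · rw [dupsFrom, if_neg h, ih]
      by_cases hyx : y = x
      · subst hyx
        have hys : y ∈ s ++ [y] := by simp
        have hcnt : (y :: t).count y = t.count y + 1 := by simp
        constructor
        · rintro (⟨_, h2⟩ | ⟨h1, _⟩)
          · exact Or.inr ⟨h, by have := List.count_pos_iff.mpr h2; omega⟩
          · exact absurd hys h1
        · rintro (⟨h1, _⟩ | ⟨_, h2⟩)
          · exact absurd h1 h
          · rw [hcnt] at h2
            exact Or.inl ⟨hys, List.count_pos_iff.mp (by omega)⟩
      · have hmem : (y ∈ s ++ [x]) ↔ y ∈ s := by simp [hyx]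
        have hcnt : (x :: t).count y = t.count y := by
          simp [Ne.symm hyx]
        simp only [hmem, List.mem_cons, hcnt]
        constructor
        · rintro (⟨h1, h2⟩ | ⟨h1, h2⟩)
          · exact Or.inl ⟨h1, Or.inr h2⟩
          · exact Or.inr ⟨h1, h2⟩
        · rintro (⟨h1, rfl | h2⟩ | ⟨h1, h2⟩)
          · exact absurd rfl hyx
          · exact Or.inl ⟨h1, h2⟩
          · exact Or.inr ⟨h1, h2⟩

lemma ofold_some (l : List Int) : ∀ (b : Int),
    l.foldl (fun o x => some (match o with | none => x | some b => max b x)) (some b)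
      = some (l.foldl max b) := by
  induction l with
  | nil => intro b; rfl
  | cons x t ih => intro b; simp [List.foldl_cons, ih]

-- B's running max over a list equals Python's max? with identity key
lemma ofold_eq_max? (l : List Int) :
    l.foldl (fun o x => some (match o with | none => x | some b => max b x)) none
      = PySem.List.max? l (fun x => x) := by
  cases l with
  | nil => rfl
  | cons x t => simp [List.foldl_cons, ofold_some, PySem.List.max?_id_cons]

-- max? id depends only on membership
lemma max?_congr_mem (l₁ l₂ : List Int) (h : ∀ y, y ∈ l₁ ↔ y ∈ l₂) :
    PySem.List.max? l₁ (fun x => x) = PySem.List.max? l₂ (fun x => x) := by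
  cases h1 : PySem.List.max? l₁ (fun x => x) with
  | none =>
    rw [PySem.List.max?_eq_none_iff] at h1
    subst h1
    rw [eq_comm, PySem.List.max?_eq_none_iff, List.eq_nil_iff_forall_not_mem]
    intro y hy; exact (List.not_mem_nil (a := y)).elim ((h y).mpr hy)
  | some m =>
    cases h2 : PySem.List.max? l₂ (fun x => x) with
    | none =>
      rw [PySem.List.max?_eq_none_iff] at h2
      subst h2
      exact absurd ((h m).mp (PySem.List.max?_mem h1)) (List.not_mem_nil (a := m))
    | some m' =>
      have hm := PySem.List.max?_mem h1
      have hm' := PySem.List.max?_mem h2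
      have h1' := PySem.List.max?_isMax h1
      have h2' := PySem.List.max?_isMax h2
      exact congrArg some (le_antisymm (h2' m ((h m).mp hm)) (h1' m' ((h m').mpr hm')))

lemma duplicates_eq (arr : List Int) :
    ((PySem.Dict.counter arr).items.filter (fun p => 1 < p.2)).map Prod.fst
      = (PySem.Set.ofList arr).filter (fun k => 1 < (arr.count k : Int)) := by
  rw [PySem.Dict.items_counter, List.filter_map, List.map_map]
  simp [Function.comp_def]

-- ===== VERDICT (by name: the statement is the Claim_ definition above) =====
theorem find_max_duplicate_spec : Claim_equal_find_max_duplicate := by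
  intro arr _
  unfold Spec_find_max_duplicate
  have hA : find_max_duplicate arr =
      (if (((PySem.Dict.counter arr).items.filter (fun p => 1 < p.2)).map Prod.fst) ≠ [] then
        PySem.List.max? (((PySem.Dict.counter arr).items.filter (fun p => 1 < p.2)).map Prod.fst)
          (fun x => x)
      else none) := rfl
  have hB : find_max_duplicate_alt arr = PySem.List.max? (dupsFrom [] arr) (fun x => x) := by
    unfold find_max_duplicate_alt
    rw [foldl_snd_eq, ofold_eq_max?]
    rfl
  rw [hA, hB, duplicates_eq]
  have hmem : ∀ y, y ∈ (PySem.Set.ofList arr).filter (fun k => 1 < (arr.count k : Int))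
      ↔ y ∈ dupsFrom [] arr := by
    intro y
    rw [List.mem_filter, PySem.Set.mem_ofList, mem_dupsFrom]
    simp only [List.not_mem_nil, false_and, not_false_iff, true_and, false_or,
      decide_eq_true_eq]
    constructor
    · rintro ⟨h1, h2⟩
      have := List.count_pos_iff.mpr h1
      omega
    · intro h2
      exact ⟨List.count_pos_iff.mp (by omega), by exact_mod_cast (by omega : (2:Int) ≤ arr.count y)⟩
  by_cases hne : (PySem.Set.ofList arr).filter (fun k => 1 < (arr.count k : Int)) = []
  · rw [if_neg (not_not_intro hne)]
    rw [eq_comm, PySem.List.max?_eq_none_iff, List.eq_nil_iff_forall_not_mem]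
    intro y hy
    have hmy := (hmem y).mpr hy
    rw [hne] at hmy
    exact List.not_mem_nil hmy
  · rw [if_pos hne]
    exact max?_congr_mem _ _ hmem
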